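-- pv_equiv track=rewrite | github.com/tirtza-weinfeld/hippocampx | backend/scripts/problems/generate_symbol_tags copy 2.py | _process_comma_list
-- ===== SOURCE A (Python) =====
-- def _process_comma_list(lines: list[str]) -> list[str]:
--     """Process lines as comma-separated list, handling bullets."""
--     items: list[str] = []
--     for raw in lines:
--         s = raw.lstrip()
--         if s[:1] in "-•*":
--             s = s[1:].lstrip()
--         for part in s.split(","):
--             tok = part.strip()
--             if tok:
--                 items.append(tok)
--     return items
-- ===== SOURCE B (Python) =====
-- def _process_comma_list(lines: list[str]) -> list[str]:
--     """Single character-level scan per line (no split/strip): a small state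
--     machine that skips leading/bullet whitespace, then builds each token
--     char by char, holding interior whitespace in a pending buffer."""
--     items: list[str] = []
--     for raw in lines:
--         i, n = 0, len(raw)
--         while i < n and raw[i].isspace():
--             i += 1
--         if i < n and raw[i] in "-•*":
--             i += 1
--             while i < n and raw[i].isspace():
--                 i += 1
--         buf: list[str] = []   # committed chars of the current token
--         pend: list[str] = []  # interior whitespace not yet committed
--         while i <= n:
--             c = raw[i] if i < n else ","   # virtual trailing comma flushes the last token
--             if c == ",":
--                 if buf:
--                     items.append("".join(buf))
--             elif c.isspace():
--                 if buf:
--                     pend.append(c)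
--             else:
--                 buf += pend
--                 pend = []
--                 buf.append(c)
--             if c == ",":
--                 buf = []
--                 pend = []
--             i += 1
--     return items
-- ===== Notes on version B (the rewrite author's own statement) =====
-- stated objective: alternative
-- what changed: B replaces A's split/strip pipeline by a character-level state machine: one index scan per line that skips leading/bullet whitespace and emits tokens via a committed-chars buffer plus a pending-interior-whitespace buffer, never calling split or strip.
import Mathlib
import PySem

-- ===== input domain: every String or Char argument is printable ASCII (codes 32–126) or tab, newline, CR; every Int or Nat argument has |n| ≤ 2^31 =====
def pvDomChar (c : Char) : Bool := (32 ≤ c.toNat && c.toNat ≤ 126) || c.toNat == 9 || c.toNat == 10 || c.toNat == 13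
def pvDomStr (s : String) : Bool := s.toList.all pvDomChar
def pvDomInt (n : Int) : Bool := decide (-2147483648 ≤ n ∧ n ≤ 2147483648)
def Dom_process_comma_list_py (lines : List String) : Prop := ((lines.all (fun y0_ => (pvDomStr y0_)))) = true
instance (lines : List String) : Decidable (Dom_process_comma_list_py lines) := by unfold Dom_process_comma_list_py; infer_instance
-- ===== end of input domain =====

-- B replaces A's split/strip pipeline by a character-level state machine per line (alternative decomposition, same cost).

-- ===== PORT A =====
def process_comma_list_py (lines : List String) : List String :=
  lines.foldl (fun items raw =>
    let s := PySem.Str.lstrip raw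
    let s := if PySem.Str.isIn (PySem.Str.slice s none (some 1)) "-•*" = true then
               PySem.Str.lstrip (PySem.Str.slice s (some 1) none) else s
    (PySem.Chars.splitOn s.toList ",".toList).foldl (fun items part =>
      let tok := PySem.Chars.strip part
      if tok ≠ [] then items ++ [String.ofList tok] else items) items) []

-- ===== PORT B =====
-- Source B's 'while i < n and raw[i].isspace(): i += 1'
def skipWs : List Char → List Char
  | [] => []
  | c :: r => if PySem.Chars.isspace c then skipWs r else c :: r

-- Source B's main 'while i <= n' scanner over the remaining chars with state (buf, pend, items);
-- the nil case is the virtual trailing comma (i = n).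
def scanB : List Char → List Char → List Char → List String → List String
  | [], buf, _pend, items =>
      if buf ≠ [] then items ++ [String.ofList buf] else items
  | c :: rest, buf, pend, items =>
      if c = ',' then
        scanB rest [] [] (if buf ≠ [] then items ++ [String.ofList buf] else items)
      else if PySem.Chars.isspace c then
        scanB rest buf (if buf ≠ [] then pend ++ [c] else pend) items
      else
        scanB rest (buf ++ pend ++ [c]) [] items

def process_comma_list_py_alt (lines : List String) : List String :=
  lines.foldl (fun items raw =>
    let cs := skipWs raw.toList
    let cs := match cs with
      | [] => cs
      | c :: r => if c ∈ ['-', '•', '*'] then skipWs r else cs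
    scanB cs [] [] items) []

-- ===== PRECONDITION & SPEC =====
def Spec_process_comma_list_py (lines : List String) (out : List String) : Prop := out = process_comma_list_py_alt lines
instance (lines : List String) (out : List String) : Decidable (Spec_process_comma_list_py lines out) := by unfold Spec_process_comma_list_py; infer_instance

-- ===== CLAIM =====
def Claim_equal_process_comma_list_py : Prop := ∀ (lines : List String), Dom_process_comma_list_py lines → Spec_process_comma_list_py lines (process_comma_list_py lines)

-- ===== LEMMAS AND PROOFS =====

-- A's bullet-stripping, as a proof-side helper (string level)
def bulletStrip (raw : String) : String :=
  let s := PySem.Str.lstrip raw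
  if PySem.Str.isIn (PySem.Str.slice s none (some 1)) "-•*" = true then
    PySem.Str.lstrip (PySem.Str.slice s (some 1) none)
  else s

-- structural characterisation of splitting on a single comma
def csplit : List Char → List (List Char)
  | [] => [[]]
  | c :: r => if c = ',' then [] :: csplit r else (csplit r).modifyHead (c :: ·)

theorem csplit_ne_nil (l : List Char) : csplit l ≠ [] := by
  induction l with
  | nil => simp [csplit]
  | cons c r ih =>
    simp only [csplit]
    split_ifs
    · simp
    · cases h : csplit r with
      | nil => exact absurd h ih
      | cons a t => simp [List.modifyHead]

theorem csplit_cons' (l : List Char) : ∃ a t, csplit l = a :: t := by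
  cases h : csplit l with
  | nil => exact absurd h (csplit_ne_nil l)
  | cons a t => exact ⟨a, t, rfl⟩

theorem go_eq (l : List Char) : ∀ (fuel : Nat), l.length ≤ fuel →
    ∀ (cur : List Char) (acc : List (List Char)),
    PySem.Chars.splitOn.go [','] fuel l cur acc
      = acc.reverse ++ (csplit l).modifyHead (cur.reverse ++ ·) := by
  induction l with
  | nil =>
    intro fuel _ cur acc
    cases fuel <;> simp [PySem.Chars.splitOn.go, csplit]
  | cons c r ih =>
    intro fuel hf cur acc
    cases fuel with
    | zero => simp at hf
    | succ f =>
      have hf' : r.length ≤ f := by simpa using hf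
      obtain ⟨a, t, h⟩ := csplit_cons' r
      by_cases hc : c = ','
      · subst hc
        simp only [PySem.Chars.splitOn.go]
        rw [if_pos (by simp [List.isPrefixOf])]
        rw [show List.drop [','].length (','::r) = r from rfl]
        rw [ih f hf' [] (cur.reverse :: acc)]
        simp [csplit, h, List.modifyHead]
      · simp only [PySem.Chars.splitOn.go]
        rw [if_neg (by simp [List.isPrefixOf]; exact fun hh => hc hh.symm)]
        rw [ih f hf' (c :: cur) acc]
        simp [csplit, h, List.modifyHead, hc]

theorem splitOn_eq_csplit (l : List Char) : PySem.Chars.splitOn l ",".toList = csplit l := by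
  rw [show ",".toList = [','] from by decide]
  rw [PySem.Chars.splitOn, go_eq l (l.length + 1) (by omega) [] []]
  obtain ⟨a, t, h⟩ := csplit_cons' l
  simp [h, List.modifyHead]

def tokOf (part : List Char) : Option String :=
  let tok := PySem.Chars.strip part
  if tok ≠ [] then some (String.ofList tok) else none

theorem inner_foldl (parts : List (List Char)) (items : List String) :
    parts.foldl (fun items part =>
      let tok := PySem.Chars.strip part
      if tok ≠ [] then items ++ [String.ofList tok] else items) items
      = items ++ parts.filterMap tokOf := by
  induction parts generalizing items with
  | nil => simp
  | cons p ps ih =>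
    simp only [List.foldl_cons, List.filterMap_cons, ih, tokOf]
    by_cases hp : PySem.Chars.strip p ≠ []
    · simp [hp]
    · simp [hp]

theorem A_foldl (lines : List String) (items : List String) :
    lines.foldl (fun items raw =>
      let s := PySem.Str.lstrip raw
      let s := if PySem.Str.isIn (PySem.Str.slice s none (some 1)) "-•*" = true then
                 PySem.Str.lstrip (PySem.Str.slice s (some 1) none) else s
      (PySem.Chars.splitOn s.toList ",".toList).foldl (fun items part =>
        let tok := PySem.Chars.strip part
        if tok ≠ [] then items ++ [String.ofList tok] else items) items) items
      = items ++ lines.flatMap (fun raw => (csplit (bulletStrip raw).toList).filterMap tokOf) := by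
  induction lines generalizing items with
  | nil => simp
  | cons raw rest ih =>
    simp only [List.foldl_cons, List.flatMap_cons]
    rw [show (let s := PySem.Str.lstrip raw
      let s := if PySem.Str.isIn (PySem.Str.slice s none (some 1)) "-•*" = true then
                 PySem.Str.lstrip (PySem.Str.slice s (some 1) none) else s
      (PySem.Chars.splitOn s.toList ",".toList).foldl (fun items part =>
        let tok := PySem.Chars.strip part
        if tok ≠ [] then items ++ [String.ofList tok] else items) items)
      = items ++ (csplit (bulletStrip raw).toList).filterMap tokOf from by
        simp only [bulletStrip, splitOn_eq_csplit]
        exact inner_foldl _ items]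
    rw [ih]
    simp

-- ---- B-side lemmas ----

-- what the scanner's buffer holds at the end of a (virtual) segment
def finBuf (buf pend : List Char) : List Char → List Char
  | [] => buf
  | c :: r => if PySem.Chars.isspace c then finBuf buf (if buf ≠ [] then pend ++ [c] else pend) r
              else finBuf (buf ++ pend ++ [c]) [] r

theorem skipWs_eq_lstrip (l : List Char) : skipWs l = PySem.Chars.lstrip l := by
  induction l with
  | nil => simp [skipWs, PySem.Chars.lstrip]
  | cons c r ih =>
    simp only [skipWs, PySem.Chars.lstrip, List.dropWhile] at *
    by_cases h : PySem.Chars.isspace c <;> simp [h, ih]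

theorem rstrip_all_space (l : List Char) (h : ∀ c ∈ l, PySem.Chars.isspace c = true) :
    PySem.Chars.rstrip l = [] := by
  simp only [PySem.Chars.rstrip]
  rw [List.dropWhile_eq_nil_iff.mpr (fun c hc => h c (List.mem_reverse.mp hc))]
  rfl

theorem rstrip_append_cons (xs r : List Char) (c : Char) (hc : PySem.Chars.isspace c = false) :
    PySem.Chars.rstrip (xs ++ c :: r) = xs ++ c :: PySem.Chars.rstrip r := by
  simp only [PySem.Chars.rstrip, List.reverse_append, List.reverse_cons]
  rw [show r.reverse ++ [c] ++ xs.reverse = r.reverse ++ (c :: xs.reverse) by simp]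
  rw [List.dropWhile_append]
  by_cases h : (List.dropWhile PySem.Chars.isspace r.reverse).isEmpty
  · rw [if_pos h]
    simp only [List.dropWhile_cons, hc]
    simp only [List.isEmpty_iff] at h
    simp [h]
  · rw [if_neg h]
    simp

theorem finBuf_ne_nil (buf pend seg : List Char) (hbuf : buf ≠ [])
    (hpend : ∀ c ∈ pend, PySem.Chars.isspace c = true) :
    finBuf buf pend seg = buf ++ PySem.Chars.rstrip (pend ++ seg) := by
  induction seg generalizing buf pend with
  | nil =>
    simp only [finBuf, List.append_nil]
    rw [rstrip_all_space pend hpend, List.append_nil]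
  | cons c r ih =>
    simp only [finBuf]
    by_cases hc : PySem.Chars.isspace c = true
    · rw [if_pos hc, if_pos hbuf, ih buf (pend ++ [c]) hbuf
        (by intro x hx; rcases List.mem_append.mp hx with h | h
            · exact hpend x h
            · simp at h; subst h; exact hc)]
      simp
    · rw [if_neg (by simpa using hc)]
      rw [ih (buf ++ pend ++ [c]) [] (by simp) (by simp)]
      rw [rstrip_append_cons pend r c (by simpa using hc)]
      simp

theorem finBuf_nil_strip (seg : List Char) : finBuf [] [] seg = PySem.Chars.strip seg := by
  induction seg with
  | nil => simp [finBuf, PySem.Chars.strip, PySem.Chars.lstrip, PySem.Chars.rstrip]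
  | cons c r ih =>
    simp only [finBuf]
    by_cases hc : PySem.Chars.isspace c = true
    · rw [if_pos hc]
      simp only [ne_eq, not_true_eq_false, if_false]
      rw [ih]
      simp [PySem.Chars.strip, PySem.Chars.lstrip, hc]
    · rw [if_neg hc]
      simp only [List.nil_append]
      rw [finBuf_ne_nil [c] [] r (by simp) (by simp)]
      have : PySem.Chars.strip (c :: r) = c :: PySem.Chars.rstrip r := by
        simp only [PySem.Chars.strip, PySem.Chars.lstrip, List.dropWhile_cons, hc]
        simp only [Bool.false_eq_true, if_false]
        have := rstrip_append_cons [] r c (by simpa using hc)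
        simpa using this
      simp [this]

def optTok (x : List Char) : List String :=
  if x ≠ [] then [String.ofList x] else []

theorem scanB_eq (l : List Char) : ∀ (buf pend : List Char) (items : List String)
    (a : List Char) (t : List (List Char)), csplit l = a :: t →
    scanB l buf pend items = items ++ optTok (finBuf buf pend a) ++ t.filterMap tokOf := by
  induction l with
  | nil =>
    intro buf pend items a t h
    simp only [csplit] at h
    injection h with h1 h2
    subst h1; subst h2
    by_cases hb : buf = [] <;> simp [scanB, finBuf, optTok, hb]
  | cons c r ih =>
    intro buf pend items a t h
    obtain ⟨a', t', h'⟩ := csplit_cons' r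
    by_cases hc : c = ','
    · subst hc
      simp only [csplit] at h
      injection h with h1 h2
      subst h1
      simp only [scanB]
      rw [ih [] [] _ a' t' h', finBuf_nil_strip]
      subst h2
      simp only [finBuf, tokOf, optTok]
      by_cases ha : PySem.Chars.strip a' = [] <;> by_cases hb : buf = [] <;> simp [ha, hb, h']
    · simp only [csplit, if_neg hc, h', List.modifyHead] at h
      injection h with h1 h2
      subst h1; subst h2
      simp only [scanB, if_neg hc]
      by_cases hs : PySem.Chars.isspace c = true
      · rw [if_pos hs, ih _ _ _ a' t' h']
        simp only [finBuf, if_pos hs]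
      · rw [if_neg hs, ih _ _ _ a' t' h']
        simp only [finBuf, if_neg hs]

theorem scanB_segments (l : List Char) (items : List String) :
    scanB l [] [] items = items ++ (csplit l).filterMap tokOf := by
  obtain ⟨a, t, h⟩ := csplit_cons' l
  rw [scanB_eq l [] [] items a t h, finBuf_nil_strip, h]
  simp only [List.filterMap_cons, tokOf, optTok]
  by_cases ha : PySem.Chars.strip a ≠ [] <;> simp [ha]

-- B's per-line bullet skipping equals A's bulletStrip (on char lists)
theorem bullet_eq (raw : String) :
    (match skipWs raw.toList with
      | [] => skipWs raw.toList
      | c :: r => if c ∈ ['-', '•', '*'] then skipWs r else skipWs raw.toList)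
    = (bulletStrip raw).toList := by
  simp only [bulletStrip]
  rw [skipWs_eq_lstrip]
  cases h : PySem.Chars.lstrip raw.toList with
  | nil =>
    have hsl : (PySem.Str.slice (PySem.Str.lstrip raw) none (some 1)).toList = [] := by
      simp [PySem.List.slice_to, h]
    rw [if_pos (by
      rw [PySem.Str.isIn_iff_infix, hsl]
      exact List.nil_infix)]
    have hdr : (PySem.Str.slice (PySem.Str.lstrip raw) (some 1) none).toList = [] := by
      simp [PySem.List.slice_from, h]
    simp [hdr, PySem.Chars.lstrip]
  | cons c r =>
    have htake : (PySem.Str.slice (PySem.Str.lstrip raw) none (some 1)).toList = [c] := by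
      simp [PySem.List.slice_to, h]
    have hdrop : (PySem.Str.slice (PySem.Str.lstrip raw) (some 1) none).toList = r := by
      simp [PySem.List.slice_from, h]
    have he : "-•*".toList = ['-', '•', '*'] := rfl
    show (if c ∈ ['-', '•', '*'] then skipWs r else c :: r) = _
    by_cases hm : c ∈ ['-', '•', '*']
    · rw [if_pos hm]
      rw [if_pos (by
        rw [PySem.Str.isIn_iff_infix, htake]
        exact (List.singleton_infix_iff c _).mpr (he ▸ hm))]
      rw [skipWs_eq_lstrip]
      simp [hdrop]
    · rw [if_neg hm]
      rw [if_neg (by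
        rw [PySem.Str.isIn_iff_infix, htake]
        intro hinf
        exact hm (he ▸ (List.singleton_infix_iff c _).mp hinf))]
      simp [h]

theorem B_foldl (lines : List String) (items : List String) :
    lines.foldl (fun items raw =>
      let cs := skipWs raw.toList
      let cs := match cs with
        | [] => cs
        | c :: r => if c ∈ ['-', '•', '*'] then skipWs r else cs
      scanB cs [] [] items) items
      = items ++ lines.flatMap (fun raw => (csplit (bulletStrip raw).toList).filterMap tokOf) := by
  induction lines generalizing items with
  | nil => simp
  | cons raw rest ih =>
    simp only [List.foldl_cons, List.flatMap_cons]
    have hb := bullet_eq raw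
    rw [show (let cs := skipWs raw.toList
      let cs := match cs with
        | [] => cs
        | c :: r => if c ∈ ['-', '•', '*'] then skipWs r else cs
      scanB cs [] [] items) = items ++ (csplit (bulletStrip raw).toList).filterMap tokOf from by
        show scanB (match skipWs raw.toList with
          | [] => skipWs raw.toList
          | c :: r => if c ∈ ['-', '•', '*'] then skipWs r else skipWs raw.toList) [] [] items = _
        rw [hb, scanB_segments]]
    rw [ih]
    simp

-- ===== VERDICT =====
theorem process_comma_list_py_spec : Claim_equal_process_comma_list_py := by
  intro lines _
  show process_comma_list_py lines = process_comma_list_py_alt lines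
  unfold process_comma_list_py process_comma_list_py_alt
  rw [A_foldl lines [], B_foldl lines []]
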